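-- pv_equiv track=rewrite | github.com/JVieir4/Python | 4.Pesquisa Exaustiva/anel.py | aux
-- ===== SOURCE A (Python) =====
-- def isPrime(n):
--     for i in range(2, int(n/2)):
--         if n%i==0:
--             return False
--     return True
--
-- def complete(p,c):
--     return len(c) == p
--
-- def extensions(p,c):
--     l = list()
--     if c == []:
--         return range(1, p+1)
--     for i in range(1, p+1):
--         if i not in c and isPrime(i+c[-1]):
--             if len(c) != p-1 or isPrime(i+c[0]):
--                 l.append(i)
--     return l
--
-- def valid(p,c):
--     return True
--
-- def aux(p,c):
--     if complete(p,c):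
--         return valid(p,c)
--     for x in extensions(p,c):
--         c.append(x)
--         if aux(p,c):
--             return True
--         c.pop()
--     return False
-- ===== SOURCE B (Python) =====
-- def isPrime(n):
--     for i in range(2, int(n/2)):
--         if n%i==0:
--             return False
--     return True
--
-- def valid(p,c):
--     return True
--
-- def aux(p, c):
--     # Functional backtracking over an explicitly maintained list of unused
--     # candidates; like the original, on success c is extended in place with
--     # the found completion (the search itself does not mutate c).
--     if len(c) == p:
--         return valid(p, c)
--     n0 = len(c)
--     first0 = c[0] if c else None
--
--     def ok(x, path):
--         if path:
--             last = path[-1]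
--         elif c:
--             last = c[-1]
--         else:
--             return True
--         if not isPrime(x + last):
--             return False
--         if n0 + len(path) == p - 1:
--             first = first0 if first0 is not None else path[0]
--             if not isPrime(x + first):
--                 return False
--         return True
--
--     def solve(rem, path):
--         if n0 + len(path) == p:
--             return path if valid(p, c + path) else None
--         for x in rem:
--             if ok(x, path):
--                 res = solve([y for y in rem if y != x], path + [x])
--                 if res is not None:
--                     return res
--         return None
--
--     res = solve([i for i in range(1, p + 1) if i not in c], [])
--     if res is None:
--         return False
--     c.extend(res)
--     return True
-- ===== Notes on version B (the rewrite author's own statement) =====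
-- stated objective: alternative
-- what changed: Replaces the recursive append/pop backtracking over the shared mutable list by a functional search that threads an explicit list of still-unused candidates and a separate path, returning the found completion instead of mutating during the search (c is extended once at the end, giving the same final state).
import Mathlib
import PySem

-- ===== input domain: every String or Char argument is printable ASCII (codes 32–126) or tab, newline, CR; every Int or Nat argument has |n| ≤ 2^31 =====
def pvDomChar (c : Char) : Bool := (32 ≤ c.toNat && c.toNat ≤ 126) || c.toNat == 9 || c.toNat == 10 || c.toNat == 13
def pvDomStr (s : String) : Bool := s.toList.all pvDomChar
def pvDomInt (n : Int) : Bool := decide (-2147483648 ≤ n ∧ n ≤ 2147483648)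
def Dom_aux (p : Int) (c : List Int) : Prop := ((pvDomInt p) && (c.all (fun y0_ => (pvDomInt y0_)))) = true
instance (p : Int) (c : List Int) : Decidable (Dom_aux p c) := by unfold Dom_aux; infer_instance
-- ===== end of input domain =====

-- B replaces the recursive mutate-and-pop backtracking by a functional search that
-- threads an explicit list of unused candidates; return values proved equal (A mutates
-- c in place during the search; B reproduces only the final state of c, as tested).

-- ===== PORT A =====
-- module helpers (shared by both Python files, hence by both ports)
-- for i in range(2, int(n/2)): if n%i==0: return False  (early exit, as in Python)
def pyIsPrimeLoop (n i bound : Int) : Bool :=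
  if i < bound then
    if PySem.Int.mod n i == 0 then false
    else pyIsPrimeLoop n (i + 1) bound
  else true
termination_by (bound - i).toNat
decreasing_by omega

def pyIsPrime (n : Int) : Bool := pyIsPrimeLoop n 2 (PySem.Int.truncdiv n 2)

def pyValid (_p : Int) (_c : List Int) : Bool := true

def pyComplete (p : Int) (c : List Int) : Bool := PySem.List.len c == p

def pyExtensions (p : Int) (c : List Int) : List Int :=
  if c == ([] : List Int) then PySem.List.pyRange 1 (p + 1) 1
  else
    (PySem.List.pyRange 1 (p + 1) 1).foldl (fun l i =>
      if !(c.contains i) && pyIsPrime (i + PySem.List.pyGetD c (-1) 0) then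
        if !(PySem.List.len c == p - 1) || pyIsPrime (i + PySem.List.pyGetD c 0 0) then l ++ [i]
        else l
      else l) []

-- measure for A's recursion: how many of 1..p are not yet in c
def auxMissing (p : Int) (c : List Int) : Nat :=
  ((PySem.List.pyRange 1 (p + 1) 1).filter (fun i => !(c.contains i))).length

theorem pyExtensions_eq_filter (p : Int) (c : List Int) (hc : c ≠ []) :
    pyExtensions p c = (PySem.List.pyRange 1 (p + 1) 1).filter (fun i =>
      (!(c.contains i) && pyIsPrime (i + PySem.List.pyGetD c (-1) 0)) &&
      (!(PySem.List.len c == p - 1) || pyIsPrime (i + PySem.List.pyGetD c 0 0))) := by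
  unfold pyExtensions
  simp only [beq_iff_eq, hc, if_false]
  rw [show (fun (l : List Int) i =>
      if !(c.contains i) && pyIsPrime (i + PySem.List.pyGetD c (-1) 0) then
        if !(PySem.List.len c == p - 1) || pyIsPrime (i + PySem.List.pyGetD c 0 0) then l ++ [i]
        else l
      else l) = (fun (l : List Int) i =>
      if (!(c.contains i) && pyIsPrime (i + PySem.List.pyGetD c (-1) 0)) &&
         (!(PySem.List.len c == p - 1) || pyIsPrime (i + PySem.List.pyGetD c 0 0)) then l ++ [i]
      else l) from by
    funext l i
    split_ifs <;> simp_all]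
  rw [PySem.List.foldl_append_if_eq_filter]
  simp

theorem filter_ne_length_lt {x : Int} {l : List Int} (hx : x ∈ l) :
    (l.filter (fun y => !(y == x))).length < l.length := by
  rw [List.length_filter_lt_length_iff_exists]
  exact ⟨x, hx, by simp⟩

theorem mem_pyExtensions (p : Int) (c : List Int) {x : Int} (hx : x ∈ pyExtensions p c) :
    x ∈ PySem.List.pyRange 1 (p + 1) 1 ∧ c.contains x = false := by
  by_cases hc : c = []
  · subst hc
    unfold pyExtensions at hx
    simpa using hx
  · rw [pyExtensions_eq_filter p c hc] at hx
    have := List.mem_filter.1 hx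
    refine ⟨this.1, ?_⟩
    have h := this.2
    simp only [Bool.and_eq_true, Bool.not_eq_true'] at h
    exact h.1.1

theorem auxMissing_lt (p : Int) (c : List Int) {x : Int} (hx : x ∈ pyExtensions p c) :
    auxMissing p (c ++ [x]) < auxMissing p c := by
  obtain ⟨hr, hnc⟩ := mem_pyExtensions p c hx
  unfold auxMissing
  have hfun : (fun i : Int => !((c ++ [x]).contains i)) =
      (fun i : Int => (!(i == x)) && !(c.contains i)) := by
    funext i
    by_cases h1 : i ∈ c <;> by_cases h2 : i = x <;> simp [h1, h2]
  rw [hfun, ← List.filter_filter]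
  apply filter_ne_length_lt
  exact List.mem_filter.2 ⟨hr, by simpa using hnc⟩

def aux (p : Int) (c : List Int) : Bool :=
  if pyComplete p c then pyValid p c
  else (pyExtensions p c).attach.any (fun x => aux p (c ++ [x.1]))
termination_by auxMissing p c
decreasing_by exact auxMissing_lt p c x.2

-- ===== PORT B =====
def okB (p n0 : Int) (c : List Int) (first0 : Option Int) (x : Int) (path : List Int) : Bool :=
  match path.getLast?.or c.getLast? with
  | none => true            -- path and c both empty: every candidate is allowed
  | some last =>
    if !pyIsPrime (x + last) then false
    else if n0 + PySem.List.len path == p - 1 then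
      -- path[0]: Python reaches it only with path ≠ [], where headD 0 is exact
      pyIsPrime (x + first0.getD (path.headD 0))
    else true

def solveB (p n0 : Int) (c : List Int) (first0 : Option Int) (rem path : List Int) :
    Option (List Int) :=
  if n0 + PySem.List.len path == p then
    if pyValid p (c ++ path) then some path else none
  else
    rem.attach.findSome? (fun x =>
      if okB p n0 c first0 x.1 path then
        solveB p n0 c first0 (rem.filter (fun y => !(y == x.1))) (path ++ [x.1])
      else none)
termination_by rem.length
decreasing_by
  have h2 := filter_ne_length_lt x.2
  rw [← List.countP_eq_length_filter] at h2
  simp only [List.length_unattach, ← List.countP_eq_length_filter]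
  rw [List.countP_attach (p := fun y => !(y == x.1))]
  exact h2

def aux_alt (p : Int) (c : List Int) : Bool :=
  if PySem.List.len c == p then pyValid p c
  else
    match solveB p (PySem.List.len c) c c.head?
        ((PySem.List.pyRange 1 (p + 1) 1).filter (fun i => !(c.contains i))) [] with
    | none => false
    | some _ => true      -- Python also does c.extend(res) here (same final c as A)

-- ===== PRECONDITION & SPEC =====
def Spec_aux (p : Int) (c : List Int) (out : Bool) : Prop := out = aux_alt p c
instance (p : Int) (c : List Int) (out : Bool) : Decidable (Spec_aux p c out) := by unfold Spec_aux; infer_instance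

-- ===== CLAIM (what is proved, stated in full; the proofs are below) =====
def Claim_equal_aux : Prop := ∀ (p : Int) (c : List Int), Dom_aux p c → Spec_aux p c (aux p c)

-- ===== LEMMAS AND PROOFS =====
theorem any_attach_eq {α : Type} (l : List α) (g : α → Bool) :
    (l.attach.any (fun x => g x.1)) = l.any g := by
  induction l with
  | nil => simp
  | cons a l ih => simp [List.attach_cons]

theorem isSome_findSome?_attach {α β : Type} (l : List α) (f : α → Option β) :
    (l.attach.findSome? (fun x => f x.1)).isSome = l.any (fun x => (f x).isSome) := by
  induction l with
  | nil => simp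
  | cons a l ih =>
    simp only [List.attach_cons, List.findSome?_cons, List.findSome?_map, List.any_cons]
    cases h : f a <;> simp [← ih, Function.comp_def]

theorem any_congr_mem {α : Type} {l : List α} {f g : α → Bool}
    (h : ∀ x ∈ l, f x = g x) : l.any f = l.any g := by
  induction l with
  | nil => rfl
  | cons a l ih => simp [h a (by simp), ih (fun x hx => h x (by simp [hx]))]

-- the invariant: rem is exactly the ascending list of unused candidates
def remInv (p : Int) (c path : List Int) : List Int :=
  (PySem.List.pyRange 1 (p + 1) 1).filter (fun i => !((c ++ path).contains i))

theorem remInv_step (p : Int) (c path : List Int) (x : Int) :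
    (remInv p c path).filter (fun y => !(y == x)) = remInv p c (path ++ [x]) := by
  unfold remInv
  rw [List.filter_filter]
  apply List.filter_congr
  intro i _
  by_cases hc1 : i ∈ c <;> by_cases hp1 : i ∈ path <;> by_cases h2 : i = x <;>
    simp [hc1, hp1, h2]

-- okB agrees with A's extension predicate on the combined list c ++ path
theorem okB_eq_pred (p : Int) (c path : List Int) (x : Int) (h : c ++ path ≠ []) :
    okB p (PySem.List.len c) c c.head? x path =
      (pyIsPrime (x + PySem.List.pyGetD (c ++ path) (-1) 0) &&
       (!(PySem.List.len (c ++ path) == p - 1) || pyIsPrime (x + PySem.List.pyGetD (c ++ path) 0 0))) := by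
  have hlast : (c ++ path).getLast? = path.getLast?.or c.getLast? := by
    simp [List.getLast?_append]
  have hlen : PySem.List.len (c ++ path) = PySem.List.len c + PySem.List.len path := by
    simp [PySem.List.len_eq]
  obtain ⟨l, hl⟩ : ∃ l, (c ++ path).getLast? = some l :=
    Option.isSome_iff_exists.1 (List.getLast?_isSome.2 h)
  have hD : PySem.List.pyGetD (c ++ path) (-1) 0 = l := by
    rw [PySem.List.pyGetD_neg_one (c ++ path) 0 h]
    rw [List.getLast?_eq_some_getLast h] at hl
    exact Option.some_inj.mp hl
  have h0 : PySem.List.pyGetD (c ++ path) 0 0 = Option.getD c.head? (path.headD 0) := by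
    rw [PySem.List.pyGetD_zero]
    cases c with
    | nil => cases path <;> simp
    | cons a c' => simp
  unfold okB
  rw [← hlast, hl, hD, hlen, h0]
  by_cases h1 : pyIsPrime (x + l) = true <;>
    by_cases h2 : (PySem.List.len c + PySem.List.len path == p - 1) = true <;>
    simp [h1, beq_eq_decide]

-- main lemma: B's solve decides exactly what A's recursion decides
theorem solve_eq (p : Int) (c : List Int) :
    ∀ n path, (remInv p c path).length = n →
      (solveB p (PySem.List.len c) c c.head? (remInv p c path) path).isSome = aux p (c ++ path) := by
  intro n
  induction n using Nat.strong_induction_on with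
  | _ n ih =>
    intro path hn
    rw [solveB.eq_def, aux.eq_def]
    have hcomp : (PySem.List.len c + PySem.List.len path == p) = pyComplete p (c ++ path) := by
      simp [pyComplete, PySem.List.len_eq]
    by_cases hc : (PySem.List.len c + PySem.List.len path == p) = true
    · have hcc : pyComplete p (c ++ path) = true := by rw [← hcomp]; exact hc
      rw [if_pos hc, if_pos hcc]
      simp [pyValid]
    · have hcc : ¬ pyComplete p (c ++ path) = true := by rw [← hcomp]; exact hc
      rw [if_neg hc, if_neg hcc]
      rw [isSome_findSome?_attach (remInv p c path) (fun x =>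
            if okB p (PySem.List.len c) c c.head? x path then
              solveB p (PySem.List.len c) c c.head?
                ((remInv p c path).filter (fun y => !(y == x))) (path ++ [x])
            else none),
          any_attach_eq (pyExtensions p (c ++ path)) (fun x => aux p (c ++ path ++ [x]))]
      -- rewrite B's side: skipped candidates drop out, recursive calls use the IH
      have hB : (remInv p c path).any (fun x =>
            (if okB p (PySem.List.len c) c c.head? x path then
              solveB p (PySem.List.len c) c c.head?
                ((remInv p c path).filter (fun y => !(y == x))) (path ++ [x])
            else none).isSome) =
          (remInv p c path).any (fun x =>
            okB p (PySem.List.len c) c c.head? x path && aux p (c ++ path ++ [x])) := by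
        apply any_congr_mem
        intro x hx
        by_cases hok : okB p (PySem.List.len c) c c.head? x path = true
        · rw [if_pos hok, remInv_step]
          have hlt : (remInv p c (path ++ [x])).length < n := by
            rw [← hn, ← remInv_step]
            exact filter_ne_length_lt hx
          rw [ih _ hlt (path ++ [x]) rfl]
          simp only [PySem.List.len_eq] at hok
          simp [hok, List.append_assoc]
        · rw [if_neg hok]
          simp only [PySem.List.len_eq, Bool.not_eq_true] at hok
          simp [hok]
      rw [hB]
      -- now compare with A's any over pyExtensions
      by_cases hcc : c ++ path = []
      · -- both c and path empty: no checks on either side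
        have hc0 : c = [] := by
          rcases List.append_eq_nil_iff.1 hcc with ⟨h1, _⟩; exact h1
        have hp0 : path = [] := by
          rcases List.append_eq_nil_iff.1 hcc with ⟨_, h2⟩; exact h2
        subst hc0; subst hp0
        have hrem : remInv p [] [] = PySem.List.pyRange 1 (p + 1) 1 := by
          unfold remInv; simp
        have hext : pyExtensions p [] = PySem.List.pyRange 1 (p + 1) 1 := by
          unfold pyExtensions; simp
        rw [hrem]
        simp only [List.nil_append, List.append_nil]
        rw [hext]
        apply any_congr_mem
        intro x _
        simp [okB]
      · rw [pyExtensions_eq_filter p (c ++ path) hcc, List.any_filter]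
        unfold remInv
        rw [List.any_filter]
        apply any_congr_mem
        intro x _
        rw [okB_eq_pred p c path x hcc]
        by_cases hm : ((c ++ path).contains x) = true <;>
          simp [Bool.and_assoc]

-- ===== VERDICT (by name: the statement is the Claim_ definition above) =====
theorem aux_spec : Claim_equal_aux := by
  intro p c _hdom
  unfold Spec_aux aux_alt
  by_cases hc : (PySem.List.len c == p) = true
  · rw [if_pos hc, aux.eq_def, if_pos (show pyComplete p c = true from hc)]
  · rw [if_neg hc]
    have hrem : (PySem.List.pyRange 1 (p + 1) 1).filter (fun i => !(c.contains i)) =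
        remInv p c [] := by
      unfold remInv; simp
    rw [hrem]
    have h := solve_eq p c (remInv p c []).length [] rfl
    rw [List.append_nil] at h
    rw [← h]
    cases hsv : solveB p (PySem.List.len c) c c.head? (remInv p c []) [] <;> simp
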